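-- pv_equiv track=rewrite | github.com/EHwooKim/Algorithms | Test/2020_socar/socar03.py | solution
-- ===== SOURCE A (Python) =====
-- def MBN(arr, tmp, length):
--   numbers = '0123456789'
--
--   if len(tmp) == length:
--     arr.append(tmp)
--     return arr
--
--   for n in numbers:
--     if len(tmp) == 0 or (len(tmp) and tmp[-1] < n):
--       arr = MBN(arr, tmp + n, length)
--
--   return arr
--
-- def solution(k):
--   length = 1
--   arr = []
--
--   while length <= 10:
--     arr += MBN([], '', length)
--     length +=1
--
--   if k <= len(arr):
--     return arr[k-1]
--   else:
--     return '-1'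
-- ===== SOURCE B (Python) =====
-- def solution(k):
--     # Iterative breadth-first build: each round extends every string of the
--     # previous length by one larger digit; no recursion, each level built once.
--     digits = '0123456789'
--     arr = []
--     level = ['']
--     for _ in range(10):
--         level = [p + c for p in level for c in digits if not p or p[-1] < c]
--         arr += level
--     if k <= len(arr):
--         return arr[k - 1]
--     return '-1'
-- ===== Notes on version B (the rewrite author's own statement) =====
-- stated objective: alternative
-- what changed: A's recursive DFS generator MBN, re-run from scratch for each target length 1..10, is replaced by one iterative breadth-first pass that extends the previous level of strings by one larger digit per round; the final arr[k-1]/-1 logic is unchanged.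
import Mathlib
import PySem

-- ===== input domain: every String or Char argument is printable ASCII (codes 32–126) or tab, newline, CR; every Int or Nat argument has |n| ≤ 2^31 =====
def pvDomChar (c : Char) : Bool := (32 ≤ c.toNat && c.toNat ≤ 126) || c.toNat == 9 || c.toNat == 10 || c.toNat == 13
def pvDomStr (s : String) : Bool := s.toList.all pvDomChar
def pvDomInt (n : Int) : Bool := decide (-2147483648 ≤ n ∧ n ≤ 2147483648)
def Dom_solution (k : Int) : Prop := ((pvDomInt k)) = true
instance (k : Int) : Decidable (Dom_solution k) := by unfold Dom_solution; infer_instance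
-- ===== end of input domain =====

-- B replaces A's per-length recursive DFS generator (restarted from scratch for every length)
-- by a single iterative breadth-first pass that extends the previous level once per round.

-- ===== PORT A =====
-- MBN(arr, tmp, length): recursion terminates because tmp grows toward length; fuel 11 > 10 bounds the depth.
def solutionMBN (fuel : Nat) (arr : List (List Char)) (tmp : List Char) (length : Int) : List (List Char) :=
  match fuel with
  | 0 => arr
  | fuel+1 =>
    if (tmp.length : Int) = length then arr ++ [tmp]
    else ("0123456789".toList).foldl (fun arr n =>
      if tmp.length = 0 ∨ (tmp.length ≠ 0 ∧ (PySem.List.pyGet? tmp (-1)).getD ' ' < n)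
      then solutionMBN fuel arr (tmp ++ [n]) length
      else arr) arr

-- `length = 1; while length <= 10: arr += MBN([], '', length); length += 1` as a fold over range(1, 11)
def solutionArr : List (List Char) :=
  (PySem.List.pyRange 1 11 1).foldl (fun arr length => arr ++ solutionMBN 11 [] [] length) []

def solution (k : Int) : String :=
  let arr := solutionArr
  if k ≤ (arr.length : Int) then String.ofList ((PySem.List.pyGet? arr (k-1)).getD []) else "-1"

-- ===== PORT B =====
-- `for _ in range(10):` carrying (arr, level); the comprehension is flatMap over level, filterMap over digits
def solutionAltState : List (List Char) × List (List Char) :=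
  (PySem.List.pyRange 0 10 1).foldl (fun st _ =>
    let level := st.2.flatMap (fun p => ("0123456789".toList).filterMap (fun c =>
      if p = [] ∨ (PySem.List.pyGet? p (-1)).getD ' ' < c then some (p ++ [c]) else none))
    (st.1 ++ level, level)) ([], [[]])

def solutionAltArr : List (List Char) := solutionAltState.1

def solution_alt (k : Int) : String :=
  let arr := solutionAltArr
  if k ≤ (arr.length : Int) then String.ofList ((PySem.List.pyGet? arr (k-1)).getD []) else "-1"

-- ===== PRECONDITION & SPEC =====
-- Pre_ excludes exactly k ≤ -1023: arr has 1023 elements, so Python's arr[k-1] (negative indices allowed)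
-- raises IndexError iff k-1 < -1023; both A and B raise IndexError there, nothing is excluded that A returns on.
def Pre_solution (k : Int) : Prop := -1022 ≤ k
instance (k : Int) : Decidable (Pre_solution k) := by unfold Pre_solution; infer_instance
def pvWitness_solution : Int := 5

def Spec_solution (k : Int) (out : String) : Prop := out = solution_alt k
instance (k : Int) (out : String) : Decidable (Spec_solution k out) := by unfold Spec_solution; infer_instance

-- ===== CLAIM (what is proved, stated in full; the proofs are below) =====
def Claim_equal_solution : Prop := ∀ (k : Int), Dom_solution k → Pre_solution k → Spec_solution k (solution k)

-- ===== LEMMAS AND PROOFS =====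
set_option maxRecDepth 1000000 in
set_option maxHeartbeats 4000000 in
theorem solution_arr_eq : solutionArr = solutionAltArr := by decide

-- ===== VERDICT (by name: the statement is the Claim_ definition above) =====
theorem solution_spec : Claim_equal_solution := by
  intro k _ _
  unfold Spec_solution solution solution_alt
  rw [solution_arr_eq]
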